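-- pv_equiv track=rewrite | github.com/Melatwolde/competitive-programming- | leet-code-solutions/all-divisions-with-the-highest-score-of-a-binary-array.py | maxScoreIndices
-- ===== SOURCE A (Python) =====
-- from typing import List
--
-- def maxScoreIndices(nums: List[int]) -> List[int]:
--   leftsum, rightsum = 0, nums.count(1)
--
--   d = {}
--
--   i = 0
--   while i <= len(nums):
--     score = leftsum + rightsum
--     d[i] = score
--
--     if i >= len(nums):
--       break
--
--     if nums[i] == 0:
--       leftsum += 1
--     if nums[i] == 1:
--       rightsum -= 1
--
--     i += 1
--
--   d = list(sorted(d.items(), key= lambda x: -x[1]))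
--   m = d[0][1]
--
--   res = []
--
--   for k,v in d:
--     if v == m:
--       res.append(k)
--     else:
--       break
--
--   return res
-- ===== SOURCE B (Python) =====
-- from typing import List
--
-- def maxScoreIndices(nums: List[int]) -> List[int]:
--     # One linear pass: track the running division score, the best score seen,
--     # and the ascending list of indices achieving it.
--     cur = nums.count(1)
--     best = cur
--     res = [0]
--     i = 0
--     for x in nums:
--         i += 1
--         if x == 0:
--             cur += 1
--         elif x == 1:
--             cur -= 1
--         if cur > best:
--             best = cur
--             res = [i]
--         elif cur == best:
--             res.append(i)
--     return res
-- ===== Notes on version B (the rewrite author's own statement) =====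
-- stated objective: faster
-- what changed: B replaces A's build-a-dict-of-all-scores, stable-sort-by-negated-score and take-the-leading-run pipeline by a single linear pass that maintains the running score, the best score seen and the ascending list of indices achieving it.
import Mathlib
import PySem

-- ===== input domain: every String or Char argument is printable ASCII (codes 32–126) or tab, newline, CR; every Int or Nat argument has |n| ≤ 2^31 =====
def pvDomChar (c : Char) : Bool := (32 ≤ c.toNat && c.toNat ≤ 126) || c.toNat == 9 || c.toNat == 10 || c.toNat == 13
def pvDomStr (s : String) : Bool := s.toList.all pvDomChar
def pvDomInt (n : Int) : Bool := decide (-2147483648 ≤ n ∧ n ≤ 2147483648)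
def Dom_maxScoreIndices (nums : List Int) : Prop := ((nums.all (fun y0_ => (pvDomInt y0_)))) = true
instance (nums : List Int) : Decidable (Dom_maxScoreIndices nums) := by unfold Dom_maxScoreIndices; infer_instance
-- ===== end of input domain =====

-- B replaces A's build-dict / stable-sort / take-prefix pipeline by one linear pass
-- tracking the running score, the best score seen and the indices achieving it.

-- ===== PORT A =====
-- A's while loop: rest = nums[i:]; records d[i] = leftsum + rightsum, then updates.
def maxScoreIndicesLoop (rest : List Int) (i leftsum rightsum : Int)
    (d : PySem.Dict Int Int) : PySem.Dict Int Int :=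
  let d := d.insert i (leftsum + rightsum)
  match rest with
  | [] => d            -- i >= len(nums): break
  | x :: xs =>
    let leftsum := if x = 0 then leftsum + 1 else leftsum
    let rightsum := if x = 1 then rightsum - 1 else rightsum
    maxScoreIndicesLoop xs (i + 1) leftsum rightsum d

-- A's final for-loop with break.
def maxScoreIndicesRes (items : List (Int × Int)) (m : Int) (res : List Int) : List Int :=
  match items with
  | [] => res
  | (k, v) :: t => if v = m then maxScoreIndicesRes t m (res ++ [k]) else res

def maxScoreIndices (nums : List Int) : List Int :=
  let d := maxScoreIndicesLoop nums 0 0 ((PySem.List.count nums 1 : Nat) : Int) PySem.Dict.empty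
  let ds := PySem.List.sorted d.items (fun x => -x.2)
  match ds with
  | [] => []           -- unreachable: the loop always inserts key 0, so d is never empty
  | (_, m) :: _ => maxScoreIndicesRes ds m []

-- ===== PORT B =====
def maxScoreIndices_alt (nums : List Int) : List Int :=
  let cur0 : Int := ((PySem.List.count nums 1 : Nat) : Int)
  let st := nums.foldl (fun (st : Int × Int × Int × List Int) x =>
    let i := st.1 + 1
    let cur := if x = 0 then st.2.1 + 1 else if x = 1 then st.2.1 - 1 else st.2.1
    let best := st.2.2.1
    let res := st.2.2.2
    if cur > best then (i, cur, cur, [i])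
    else if cur = best then (i, cur, best, res ++ [i])
    else (i, cur, best, res)) (0, cur0, cur0, [0])
  st.2.2.2

-- ===== PRECONDITION & SPEC =====
def Spec_maxScoreIndices (nums : List Int) (out : List Int) : Prop := out = maxScoreIndices_alt nums
instance (nums : List Int) (out : List Int) : Decidable (Spec_maxScoreIndices nums out) := by unfold Spec_maxScoreIndices; infer_instance

-- ===== CLAIM (what is proved, stated in full; the proofs are below) =====
def Claim_equal_maxScoreIndices : Prop := ∀ (nums : List Int), Dom_maxScoreIndices nums → Spec_maxScoreIndices nums (maxScoreIndices nums)

-- ===== LEMMAS AND PROOFS =====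

-- the score update both programs perform when passing one element
def pvStep (c x : Int) : Int := if x = 0 then c + 1 else if x = 1 then c - 1 else c

-- the item list [(i, c), (i+1, pvStep c x0), …] that A's dict holds
def pvItems (i c : Int) : List Int → List (Int × Int)
  | [] => [(i, c)]
  | x :: xs => (i, c) :: pvItems (i + 1) (pvStep c x) xs

-- tail of pvItems
def pvTail (i c : Int) : List Int → List (Int × Int)
  | [] => []
  | x :: xs => (i + 1, pvStep c x) :: pvTail (i + 1) (pvStep c x) xs

-- B's fold step, with the score update named (definitionally equal to the port's lambda)
def pvBStep (st : Int × Int × Int × List Int) (x : Int) : Int × Int × Int × List Int :=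
  let i := st.1 + 1
  let cur := pvStep st.2.1 x
  let best := st.2.2.1
  let res := st.2.2.2
  if cur > best then (i, cur, cur, [i])
  else if cur = best then (i, cur, best, res ++ [i])
  else (i, cur, best, res)

theorem pvItems_eq (i c : Int) (xs : List Int) :
    pvItems i c xs = (i, c) :: pvTail i c xs := by
  induction xs generalizing i c with
  | nil => rfl
  | cons x xs ih => simp [pvItems, pvTail, ih]

theorem le_foldl_max' (l : List Int) (a : Int) : a ≤ l.foldl max a :=
  (PySem.List.le_foldl_max l a).1

theorem foldl_max_mem (l : List Int) (a : Int) : l.foldl max a = a ∨ l.foldl max a ∈ l := by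
  induction l generalizing a with
  | nil => exact Or.inl rfl
  | cons x xs ih =>
    rcases ih (max a x) with h | h
    · rcases max_cases a x with ⟨he, _⟩ | ⟨he, _⟩
      · exact Or.inl (by rw [List.foldl_cons, h, he])
      · refine Or.inr ?_
        rw [List.foldl_cons, h, he]
        exact List.mem_cons_self
    · exact Or.inr (List.mem_cons_of_mem _ (by rw [List.foldl_cons]; exact h))

-- ---- A side: the dict's items ----
theorem loop_items (rest : List Int) : ∀ (i leftsum rightsum : Int) (d : PySem.Dict Int Int),
    (∀ k ∈ d.keys, k < i) →
    (maxScoreIndicesLoop rest i leftsum rightsum d).items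
      = d.items ++ pvItems i (leftsum + rightsum) rest := by
  induction rest with
  | nil =>
    intro i ls rs d hk
    have hc : d.contains i = false := by
      by_contra h
      have := (PySem.Dict.contains_iff_mem_keys d i).mp (by simpa using h)
      exact absurd (hk i this) (by omega)
    simp [maxScoreIndicesLoop, pvItems, PySem.Dict.items_insert_of_not_contains _ _ hc]
  | cons x xs ih =>
    intro i ls rs d hk
    have hc : d.contains i = false := by
      by_contra h
      have := (PySem.Dict.contains_iff_mem_keys d i).mp (by simpa using h)
      exact absurd (hk i this) (by omega)
    have hk' : ∀ k ∈ (d.insert i (ls + rs)).keys, k < i + 1 := by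
      intro k hkk
      rcases (PySem.Dict.mem_keys_insert d i k (ls + rs)).mp hkk with h | h
      · omega
      · have := hk k h; omega
    have hsum : (if x = 0 then ls + 1 else ls) + (if x = 1 then rs - 1 else rs)
        = pvStep (ls + rs) x := by
      unfold pvStep
      by_cases h0 : x = 0 <;> by_cases h1 : x = 1 <;> simp [h0, h1] at * <;> omega
    simp only [maxScoreIndicesLoop]
    rw [ih (i + 1) _ _ _ hk', PySem.Dict.items_insert_of_not_contains _ _ hc, hsum]
    simp [pvItems]

-- ---- stability of A's stable sort on the maximal score group ----
theorem pairwise_insertBy (x : Int × Int) (acc : List (Int × Int))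
    (hs : acc.Pairwise (fun a b => -a.2 ≤ -b.2)) :
    (PySem.List.insertBy (fun a b => decide (b.2 < a.2)) x acc).Pairwise
      (fun a b => -a.2 ≤ -b.2) := by
  induction acc with
  | nil => simp [PySem.List.insertBy]
  | cons y ys ih =>
    rcases hs with _ | ⟨hy, hys⟩
    by_cases h : y.2 < x.2
    · simp only [PySem.List.insertBy, h, decide_true, if_pos]
      refine List.Pairwise.cons ?_ (List.Pairwise.cons hy hys)
      intro z hz
      rcases List.mem_cons.mp hz with rfl | hz
      · omega
      · have := hy z hz; omega
    · simp only [PySem.List.insertBy, decide_eq_true_eq, if_neg h]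
      refine List.Pairwise.cons ?_ (ih hys)
      intro z hz
      rcases (PySem.List.mem_insertBy _ _ _ _).mp hz with rfl | hz
      · omega
      · exact hy z hz

theorem filter_insertBy (m : Int) (x : Int × Int) (acc : List (Int × Int))
    (hs : acc.Pairwise (fun a b => -a.2 ≤ -b.2)) (hmax : ∀ y ∈ acc, y.2 ≤ m) :
    ((PySem.List.insertBy (fun a b => decide (b.2 < a.2)) x acc).filter (fun p => p.2 == m))
      = acc.filter (fun p => p.2 == m) ++ (if x.2 = m then [x] else []) := by
  induction acc with
  | nil => by_cases h : x.2 = m <;> simp [PySem.List.insertBy, h]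
  | cons y ys ih =>
    rcases hs with _ | ⟨hy, hys⟩
    have hmax' : ∀ z ∈ ys, z.2 ≤ m := fun z hz => hmax z (List.mem_cons_of_mem _ hz)
    by_cases hxm : x.2 = m
    · by_cases hym : y.2 = m
      · have hb : ¬ (y.2 < x.2) := by omega
        simp only [PySem.List.insertBy, hb, decide_false, Bool.false_eq_true, if_neg,
          not_false_iff, List.filter_cons, ih hys hmax']
        simp [hxm, hym]
      · have hylt : y.2 < m := lt_of_le_of_ne (hmax y List.mem_cons_self) hym
        have hb : y.2 < x.2 := by omega
        have hnil : (y :: ys).filter (fun p => p.2 == m) = [] := by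
          apply List.filter_eq_nil_iff.mpr
          intro z hz
          rcases List.mem_cons.mp hz with rfl | hz
          · simp [hym]
          · have h1 := hy z hz
            simp only [beq_iff_eq]
            have := hmax z (List.mem_cons_of_mem _ hz)
            omega
        simp only [PySem.List.insertBy, hb, decide_true, if_pos, List.filter_cons, hnil]
        simp [hxm, hnil]
    · by_cases hb : y.2 < x.2
      · simp [PySem.List.insertBy, hb, List.filter_cons, hxm]
      · simp only [PySem.List.insertBy, hb, decide_false, Bool.false_eq_true, if_neg,
          not_false_iff, List.filter_cons, ih hys hmax']
        simp [hxm]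

theorem filter_foldl_insertBy (m : Int) (l : List (Int × Int)) :
    ∀ (acc : List (Int × Int)),
    acc.Pairwise (fun a b => -a.2 ≤ -b.2) → (∀ y ∈ acc, y.2 ≤ m) → (∀ y ∈ l, y.2 ≤ m) →
    ((l.foldl (fun acc x => PySem.List.insertBy (fun a b => decide (b.2 < a.2)) x acc) acc).filter
        (fun p => p.2 == m))
      = acc.filter (fun p => p.2 == m) ++ l.filter (fun p => p.2 == m) := by
  induction l with
  | nil => intro acc _ _ _; simp
  | cons x xs ih =>
    intro acc hs hmax hl
    have hx : x.2 ≤ m := hl x List.mem_cons_self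
    have hl' : ∀ y ∈ xs, y.2 ≤ m := fun y hy => hl y (List.mem_cons_of_mem _ hy)
    have hmax' : ∀ y ∈ PySem.List.insertBy (fun a b => decide (b.2 < a.2)) x acc, y.2 ≤ m := by
      intro y hy
      rcases (PySem.List.mem_insertBy _ _ _ _).mp hy with rfl | hy
      · exact hx
      · exact hmax y hy
    simp only [List.foldl_cons]
    rw [ih _ (pairwise_insertBy x acc hs) hmax' hl', filter_insertBy m x acc hs hmax]
    by_cases h : x.2 = m <;> simp [h, List.filter_cons]

theorem filter_sorted (m : Int) (l : List (Int × Int)) (hmax : ∀ y ∈ l, y.2 ≤ m) :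
    (PySem.List.sorted l (fun x => -x.2)).filter (fun p => p.2 == m)
      = l.filter (fun p => p.2 == m) := by
  have h := PySem.List.sorted_eq_foldl_insertBy l (fun x => -x.2)
  have hb : (fun (a b : Int × Int) => decide ((fun x : Int × Int => -x.2) a < (fun x : Int × Int => -x.2) b))
      = (fun (a b : Int × Int) => decide (b.2 < a.2)) := by
    funext a b; simp
  rw [h, hb, filter_foldl_insertBy m l [] (by simp) (by simp) hmax]
  simp

-- A's take-while-equal loop on a score-sorted list is a filter
theorem resLoop_eq (m : Int) : ∀ (s : List (Int × Int)) (res : List Int),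
    s.Pairwise (fun a b => -a.2 ≤ -b.2) → (∀ y ∈ s, y.2 ≤ m) →
    maxScoreIndicesRes s m res = res ++ (s.filter (fun p => p.2 == m)).map (·.1) := by
  intro s
  induction s with
  | nil => intro res _ _; simp [maxScoreIndicesRes]
  | cons p t ih =>
    intro res hs hmax
    obtain ⟨k, v⟩ := p
    rcases hs with _ | ⟨hp, ht⟩
    by_cases h : v = m
    · rw [show maxScoreIndicesRes ((k, v) :: t) m res = maxScoreIndicesRes t m (res ++ [k]) by
        simp [maxScoreIndicesRes, h]]
      rw [ih (res ++ [k]) ht (fun y hy => hmax y (List.mem_cons_of_mem _ hy))]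
      simp [List.filter_cons, h, List.append_assoc]
    · have hnil : ((k, v) :: t).filter (fun p => p.2 == m) = [] := by
        apply List.filter_eq_nil_iff.mpr
        intro z hz
        rcases List.mem_cons.mp hz with rfl | hz
        · simpa using h
        · have h1 := hp z hz
          have h2 := hmax (k, v) List.mem_cons_self
          simp only [beq_iff_eq]
          simp at h1 h2
          omega
      simp [maxScoreIndicesRes, h, hnil]

-- ---- B side: what the single pass computes ----
set_option maxRecDepth 8192 in
theorem bfold (xs : List Int) : ∀ (i cur best : Int) (res : List Int),
    (xs.foldl pvBStep (i, cur, best, res)).2.2.2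
    = (if best = ((pvTail i cur xs).map (·.2)).foldl max best then res else [])
      ++ ((pvTail i cur xs).filter
            (fun p => p.2 == ((pvTail i cur xs).map (·.2)).foldl max best)).map (·.1) := by
  induction xs with
  | nil => intro i cur best res; simp [pvTail]
  | cons x xs ih =>
    intro i cur best res
    simp only [List.foldl_cons, pvTail, List.map_cons, List.filter_cons]
    simp only [pvBStep]
    by_cases h1 : (pvStep cur x) > best
    · simp only [if_pos h1]
      rw [ih (i+1) (pvStep cur x) (pvStep cur x) [i+1]]
      simp only [max_eq_right (le_of_lt h1)]
      have hcle : (pvStep cur x) ≤ (((pvTail (i + 1) (pvStep cur x) xs).map (·.2)).foldl max (pvStep cur x)) := le_foldl_max' _ _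
      clear ih
      split_ifs with h2 h3 h4 <;> first
        | rfl
        | (exfalso; simp only [beq_iff_eq] at *; omega)
    · have hmaxb : max best (pvStep cur x) = best := by omega
      simp only [hmaxb]
      by_cases h2 : (pvStep cur x) = best
      · simp only [if_neg h1, if_pos h2]
        rw [ih (i+1) (pvStep cur x) best (res ++ [i+1])]
        clear ih
        split_ifs with h3 h4 h5 <;> first
          | rfl
          | (exfalso; simp only [beq_iff_eq] at *; omega)
          | simp
      · simp only [if_neg h1, if_neg h2]
        rw [ih (i+1) (pvStep cur x) best res]
        have hle := le_foldl_max' (((pvTail (i + 1) (pvStep cur x) xs).map (·.2))) best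
        clear ih
        split_ifs with h3 h4 h5 <;> first
          | rfl
          | (exfalso; simp only [beq_iff_eq] at *; omega)

-- ===== VERDICT (by name: the statement is the Claim_ definition above) =====
theorem maxScoreIndices_spec : Claim_equal_maxScoreIndices := by
  intro nums _
  unfold Spec_maxScoreIndices
  set c : Int := ((PySem.List.count nums 1 : Nat) : Int) with hc
  -- A's dict items
  have hitems : (maxScoreIndicesLoop nums 0 0 c PySem.Dict.empty).items = pvItems 0 c nums := by
    rw [loop_items nums 0 0 c PySem.Dict.empty (by simp [PySem.Dict.keys_empty])]
    show PySem.Dict.empty.items ++ pvItems 0 (0 + c) nums = _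
    rw [show PySem.Dict.empty.items = ([] : List (Int × Int)) from rfl]
    norm_num
  -- the sorted list is nonempty
  have hne : pvItems 0 c nums ≠ [] := by rw [pvItems_eq]; simp
  obtain ⟨p, t, hds⟩ : ∃ p t, PySem.List.sorted (pvItems 0 c nums) (fun x => -x.2) = p :: t := by
    cases hs : PySem.List.sorted (pvItems 0 c nums) (fun x => -x.2) with
    | nil => exact absurd ((PySem.List.sorted_eq_nil_iff _ _ _).mp hs) hne
    | cons p t => exact ⟨p, t, rfl⟩
  obtain ⟨k0, m⟩ := p
  -- every score is ≤ m
  have hmax : ∀ y ∈ pvItems 0 c nums, y.2 ≤ m := by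
    intro y hy
    have := PySem.List.key_head_sorted_le (pvItems 0 c nums) (fun x => -x.2) hds y hy
    simpa using this
  have hpair : ((k0, m) :: t).Pairwise (fun (a b : Int × Int) => -a.2 ≤ -b.2) := by
    have := PySem.List.sorted_pairwise (pvItems 0 c nums) (fun x => -x.2)
    rwa [hds] at this
  have hmaxs : ∀ y ∈ (k0, m) :: t, y.2 ≤ m := by
    intro y hy
    have : y ∈ PySem.List.sorted (pvItems 0 c nums) (fun x => -x.2) := by rw [hds]; exact hy
    exact hmax y ((PySem.List.sorted_perm _ _ _).mem_iff.mp this)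
  -- A's value
  have hA : maxScoreIndices nums = ((pvItems 0 c nums).filter (fun p => p.2 == m)).map (·.1) := by
    show (match PySem.List.sorted (maxScoreIndicesLoop nums 0 0 c PySem.Dict.empty).items
            (fun x => -x.2) with
          | [] => []
          | (_, m) :: _ => maxScoreIndicesRes (PySem.List.sorted
              (maxScoreIndicesLoop nums 0 0 c PySem.Dict.empty).items (fun x => -x.2)) m [])
        = ((pvItems 0 c nums).filter (fun p => p.2 == m)).map (·.1)
    rw [hitems, hds]
    show maxScoreIndicesRes ((k0, m) :: t) m [] = _
    rw [resLoop_eq m ((k0, m) :: t) [] hpair hmaxs]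
    rw [show ((k0, m) :: t) = PySem.List.sorted (pvItems 0 c nums) (fun x => -x.2) from hds.symm]
    rw [filter_sorted m (pvItems 0 c nums) hmax]
    simp
  -- B's value
  set M : Int := ((pvTail 0 c nums).map (·.2)).foldl max c with hM
  have hB : maxScoreIndices_alt nums
      = (if c = M then [0] else []) ++ ((pvTail 0 c nums).filter (fun p => p.2 == M)).map (·.1) := by
    show (nums.foldl pvBStep (0, c, c, [0])).2.2.2 = _
    exact bfold nums 0 c c [0]
  -- m = M
  have hm_mem : m ∈ (pvItems 0 c nums).map (·.2) := by
    have hhd : (k0, m) ∈ PySem.List.sorted (pvItems 0 c nums) (fun x => -x.2) := by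
      rw [hds]; exact List.mem_cons_self
    have := (PySem.List.sorted_perm _ _ _).mem_iff.mp hhd
    exact List.mem_map.mpr ⟨(k0, m), this, rfl⟩
  have hscores : (pvItems 0 c nums).map (·.2) = c :: (pvTail 0 c nums).map (·.2) := by
    rw [pvItems_eq]; simp
  have hMub : ∀ s ∈ (pvItems 0 c nums).map (·.2), s ≤ M := by
    intro s hs
    rw [hscores] at hs
    rcases List.mem_cons.mp hs with rfl | hs
    · exact le_foldl_max' _ _
    · exact (PySem.List.le_foldl_max _ _).2 s hs
  have hmM : m = M := by
    have h1 : m ≤ M := hMub m hm_mem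
    have h2 : M ≤ m := by
      rcases foldl_max_mem ((pvTail 0 c nums).map (·.2)) c with h | h
      · have : M ∈ (pvItems 0 c nums).map (·.2) := by rw [hscores, hM, h]; exact List.mem_cons_self
        obtain ⟨y, hy, hys⟩ := List.mem_map.mp this
        rw [← hys]; exact hmax y hy
      · have : M ∈ (pvItems 0 c nums).map (·.2) := by
          rw [hscores]; exact List.mem_cons_of_mem _ (by rw [hM]; exact h)
        obtain ⟨y, hy, hys⟩ := List.mem_map.mp this
        rw [← hys]; exact hmax y hy
    omega
  rw [hA, hB, ← hmM]
  rw [pvItems_eq, List.filter_cons]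
  by_cases h : c = m <;> simp [h]
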